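-- pv_equiv track=rewrite | github.com/lennartmoeller/Cookbook | py/src/update_readme.py | update_readme
-- ===== SOURCE A (Python) =====
-- from collections import defaultdict
--
-- def update_readme(recipes: list[dict[str, str]]) -> str:
--     groups = defaultdict(list)
--     for r in recipes:
--         if r.get("category") == "Rezeptschritte":
--             continue
--         groups[r.get("category", "")].append(r)
--     lines = ["# Kochbuch", ""]
--     for cat in sorted(groups.keys()):
--         heading = f"## {cat}" if cat else "## Uncategorized"
--         lines.append(heading)
--         lines.append("")
--         for r in sorted(groups[cat], key=lambda x: x["name"]):
--             name = r["name"]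
--             emoji = r.get("emoji", "")
--             display = f"{name} {emoji}" if emoji else name
--             path = f"recipes/{cat}/{name}.md" if cat else f"recipes/{name}.md"
--             lines.append(f"- [{display}](<{path}>)")
--         lines.append("")
--     return "\n".join(lines)
-- ===== SOURCE B (Python) =====
-- def update_readme(recipes):
--     kept = [r for r in recipes if r.get("category") != "Rezeptschritte"]
--     # two stable sorts = one sort by the composite key (category, name)
--     items = sorted(sorted(kept, key=lambda r: r["name"]), key=lambda r: r.get("category", ""))
--     lines = ["# Kochbuch", ""]
--     prev = None
--     for r in items:
--         cat = r.get("category", "")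
--         if cat != prev:
--             if prev is not None:
--                 lines.append("")
--             lines.append(f"## {cat}" if cat else "## Uncategorized")
--             lines.append("")
--             prev = cat
--         name = r["name"]
--         emoji = r.get("emoji", "")
--         display = f"{name} {emoji}" if emoji else name
--         path = f"recipes/{cat}/{name}.md" if cat else f"recipes/{name}.md"
--         lines.append(f"- [{display}](<{path}>)")
--     if prev is not None:
--         lines.append("")
--     return "\n".join(lines)
-- ===== Notes on version B (the rewrite author's own statement) =====
-- stated objective: alternative
-- what changed: Replaces A's defaultdict grouping with per-category sorts by one global stable double sort (by name, then by category = composite-key sort) followed by a single linear pass that detects category changes to emit headings and blank lines.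
import Mathlib
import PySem

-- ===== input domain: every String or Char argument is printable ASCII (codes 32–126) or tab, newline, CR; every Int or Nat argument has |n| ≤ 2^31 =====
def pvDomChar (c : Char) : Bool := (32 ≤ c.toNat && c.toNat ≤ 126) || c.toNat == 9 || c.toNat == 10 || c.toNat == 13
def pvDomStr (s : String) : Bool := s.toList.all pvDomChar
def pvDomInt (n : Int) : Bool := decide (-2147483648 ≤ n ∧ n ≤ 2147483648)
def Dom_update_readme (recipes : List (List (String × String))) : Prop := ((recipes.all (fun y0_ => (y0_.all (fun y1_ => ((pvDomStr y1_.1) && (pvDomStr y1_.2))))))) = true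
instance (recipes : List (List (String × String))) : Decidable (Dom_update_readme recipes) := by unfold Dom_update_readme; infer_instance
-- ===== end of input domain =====

-- B replaces A's defaultdict grouping + per-category sort by ONE global stable double sort
-- (by name, then by category — a composite-key sort) followed by a single linear pass that
-- detects category changes to emit headings and blank lines (objective: alternative).
-- Shared helpers: the Python expressions r.get(...), r["name"], the heading and the emitted
-- line are textually identical in both sources, so both ports use these transliterations.
-- r.get(k, dflt) on the dict built from the pair list (dict(): later duplicate keys overwrite)
def pvGet (r : List (String × String)) (k dflt : String) : String :=
  (PySem.Dict.ofList r).getD k dflt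

-- r.get("category") == "Rezeptschritte"
def pvSkip (r : List (String × String)) : Bool :=
  (PySem.Dict.ofList r).get? "category" == some "Rezeptschritte"

def pvCat (r : List (String × String)) : String := pvGet r "category" ""

-- r["name"]; exact when the key is present (Pre_); Python raises KeyError otherwise
def pvName (r : List (String × String)) : String := pvGet r "name" ""

-- the f"- [{display}](<{path}>)" line for a recipe r under category heading cat
def pvLine (cat : String) (r : List (String × String)) : String :=
  let name := pvName r
  let emoji := pvGet r "emoji" ""
  let display := if emoji == "" then name else name ++ " " ++ emoji
  let path := if cat == "" then "recipes/" ++ name ++ ".md"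
              else "recipes/" ++ cat ++ "/" ++ name ++ ".md"
  "- [" ++ display ++ "](<" ++ path ++ ">)"

-- f"## {cat}" if cat else "## Uncategorized"
def pvHeading (cat : String) : String :=
  if cat == "" then "## Uncategorized" else "## " ++ cat

-- ===== PORT A =====
def update_readme (recipes : List (List (String × String))) : String :=
  let groups := recipes.foldl
    (fun d r => if pvSkip r then d
                else d.insert (pvCat r) (d.getD (pvCat r) [] ++ [r]))
    PySem.Dict.empty
  let lines := (PySem.List.sorted groups.keys (fun c => c)).foldl
    (fun acc cat =>
      let acc := acc ++ [pvHeading cat] ++ [""]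
      let acc := (PySem.List.sorted (groups.getD cat []) pvName).foldl
        (fun acc2 r => acc2 ++ [pvLine cat r]) acc
      acc ++ [""])
    ["# Kochbuch", ""]
  PySem.Str.join "\n" lines

-- ===== PORT B =====
-- one iteration of B's for-loop: state = (lines so far, prev category or None)
def pvStep (st : List String × Option String) (r : List (String × String)) :
    List String × Option String :=
  let cat := pvCat r
  if st.2 = some cat then (st.1 ++ [pvLine cat r], st.2)
  else ((if st.2 = none then st.1 else st.1 ++ [""]) ++ [pvHeading cat, ""]
          ++ [pvLine cat r], some cat)

def update_readme_alt (recipes : List (List (String × String))) : String :=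
  let kept := recipes.filter (fun r => !pvSkip r)
  let items := PySem.List.sorted (PySem.List.sorted kept pvName) pvCat
  let st := items.foldl pvStep (["# Kochbuch", ""], none)
  let lines := if st.2 = none then st.1 else st.1 ++ [""]
  PySem.Str.join "\n" lines

-- ===== PRECONDITION & SPEC =====
-- Pre_ excludes exactly the inputs where some non-skipped recipe lacks the "name" key:
-- there both Pythons raise KeyError (A in its per-group sort, B in its global sort).
def Pre_update_readme (recipes : List (List (String × String))) : Prop :=
  (recipes.all (fun r => pvSkip r || (PySem.Dict.ofList r).contains "name")) = true
instance (recipes : List (List (String × String))) : Decidable (Pre_update_readme recipes) := by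
  unfold Pre_update_readme; infer_instance

def pvWitness_update_readme : (List (List (String × String))) :=
  [[("name", "Kuchen"), ("category", "Dessert"), ("emoji", ":)")],
   [("name", "Brot")],
   [("category", "Rezeptschritte"), ("step", "1")]]

def Spec_update_readme (recipes : List (List (String × String))) (out : String) : Prop := out = update_readme_alt recipes
instance (recipes : List (List (String × String))) (out : String) : Decidable (Spec_update_readme recipes out) := by unfold Spec_update_readme; infer_instance

-- ===== CLAIM (what is proved, stated in full; the proofs are below) =====
def Claim_equal_update_readme : Prop := ∀ (recipes : List (List (String × String))), Dom_update_readme recipes → Pre_update_readme recipes → Spec_update_readme recipes (update_readme recipes)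

-- ===== LEMMAS AND PROOFS =====

-- ---- A-side: the grouping fold ----

-- a loop with `continue` is the loop over the filtered list
theorem foldl_skip_filter {α β : Type} (skip : α → Bool) (f : β → α → β) (l : List α) (d : β) :
    l.foldl (fun d r => if skip r then d else f d r) d = (l.filter (fun r => !skip r)).foldl f d := by
  induction l generalizing d with
  | nil => rfl
  | cons r l ih =>
    by_cases h : skip r <;> simp [h, ih]

-- inserting a key appends it to `keys` exactly when it is new, i.e. keys behave like a PySem.Set
theorem keys_insert_eq_add {ν : Type} (d : PySem.Dict String ν) (k : String) (v : ν) :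
    (d.insert k v).keys = PySem.Set.add d.keys k := by
  by_cases h : d.contains k = true
  · rw [PySem.Set.add_of_mem ((PySem.Dict.contains_iff_mem_keys d k).mp h)]
    simp only [PySem.Dict.insert, h, if_pos]
    simp only [PySem.Dict.keys, List.map_map]
    apply List.map_congr_left
    intro p _
    by_cases hp : p.1 = k
    · simp [hp]
    · simp [hp]
  · have hk : k ∉ d.keys := fun hm => h ((PySem.Dict.contains_iff_mem_keys d k).mpr hm)
    rw [PySem.Set.add_of_not_mem hk]
    simp only [PySem.Dict.insert, h, if_neg, Bool.false_eq_true, not_false_iff]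
    simp [PySem.Dict.keys]

-- the keys of A's grouping fold are the distinct categories in first-occurrence order
theorem group_fold_keys (l : List (List (String × String))) (d : PySem.Dict String (List (List (String × String)))) :
    (l.foldl (fun d r => d.insert (pvCat r) (d.getD (pvCat r) [] ++ [r])) d).keys
      = PySem.Set.update d.keys (l.map pvCat) := by
  induction l generalizing d with
  | nil => simp [PySem.Set.update]
  | cons r l ih =>
    simp only [List.foldl_cons, List.map_cons, PySem.Set.update_cons]
    rw [ih, keys_insert_eq_add]

-- the bucket of category c collects, in order, the kept recipes whose category is c
theorem group_fold_getD (l : List (List (String × String))) (d : PySem.Dict String (List (List (String × String)))) (c : String) :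
    (l.foldl (fun d r => d.insert (pvCat r) (d.getD (pvCat r) [] ++ [r])) d).getD c []
      = d.getD c [] ++ l.filter (fun r => pvCat r == c) := by
  induction l generalizing d with
  | nil => simp
  | cons r l ih =>
    simp only [List.foldl_cons, List.filter_cons]
    rw [ih]
    by_cases h : pvCat r = c
    · subst h; simp [PySem.Dict.getD_insert_self]
    · have hb : (pvCat r == c) = false := beq_eq_false_iff_ne.mpr h
      rw [PySem.Dict.getD_insert_of_ne _ _ _ (Ne.symm h)]
      simp [hb]

-- ---- stable sort commutes with filtering ----

-- if x sorts before every element of l, insertBy puts it in front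
theorem insertBy_front {α : Type} (bf : α → α → Bool) (x : α) (l : List α)
    (h : ∀ z ∈ l, bf x z = true) :
    PySem.List.insertBy bf x l = x :: l := by
  cases l with
  | nil => rfl
  | cons y t => simp [PySem.List.insertBy, h y (by simp)]

-- filtering commutes with inserting into a key-sorted list
theorem filter_insertBy {α κ : Type} [LinearOrder κ] (key : α → κ) (p : α → Bool) (x : α) (ys : List α)
    (hs : ys.Pairwise (fun a b => key a ≤ key b)) :
    (PySem.List.insertBy (fun a b => decide (key a < key b)) x ys).filter p
      = if p x then PySem.List.insertBy (fun a b => decide (key a < key b)) x (ys.filter p)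
        else ys.filter p := by
  induction ys with
  | nil => by_cases hp : p x <;> simp [PySem.List.insertBy, hp]
  | cons y ys ih =>
    rcases List.pairwise_cons.mp hs with ⟨h1, h2⟩
    by_cases hb : key x < key y
    · simp only [PySem.List.insertBy, hb, decide_true, if_pos]
      by_cases hp : p x
      · rw [List.filter_cons, if_pos hp, if_pos hp, insertBy_front]
        intro z hz
        rw [List.mem_filter] at hz
        rcases List.mem_cons.mp hz.1 with h | h
        · subst h; simp [hb]
        · simp [lt_of_lt_of_le hb (h1 z h)]
      · rw [List.filter_cons, if_neg hp, if_neg hp]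
    · have e1 : PySem.List.insertBy (fun a b => decide (key a < key b)) x (y :: ys)
          = y :: PySem.List.insertBy (fun a b => decide (key a < key b)) x ys := by
        simp [PySem.List.insertBy, hb]
      rw [e1]
      simp only [List.filter_cons, ih h2]
      by_cases hpy : p y
      · simp only [hpy, if_pos]
        by_cases hp : p x
        · simp only [hp, if_pos]
          simp [PySem.List.insertBy, hb]
        · simp [hp]
      · simp [hpy]

-- stable sort commutes with filtering: filter of the globally sorted list = sort of the filtered list
theorem filter_sorted {α κ : Type} [LinearOrder κ] (key : α → κ) (p : α → Bool) (xs : List α) :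
    (PySem.List.sorted xs key).filter p = PySem.List.sorted (xs.filter p) key := by
  induction xs using List.reverseRecOn with
  | nil => rfl
  | append_singleton xs x ih =>
    rw [PySem.List.sorted_eq_foldl_insertBy, PySem.List.sorted_eq_foldl_insertBy,
        List.filter_append, List.foldl_append]
    simp only [List.foldl_cons, List.foldl_nil]
    rw [← PySem.List.sorted_eq_foldl_insertBy xs key]
    rw [filter_insertBy key p x _ (PySem.List.sorted_pairwise xs key)]
    by_cases hp : p x
    · simp only [hp, if_pos, List.filter_cons, ih, List.foldl_append, List.foldl_cons,
        ← PySem.List.sorted_eq_foldl_insertBy]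
      simp
    · simp [hp, ih, ← PySem.List.sorted_eq_foldl_insertBy]

-- ---- a key-sorted list decomposes into its buckets, in key order ----

-- in a key-sorted list whose keys are all = c or > c, the c-elements form the prefix
theorem sorted_split_min {α κ : Type} [LinearOrder κ] [BEq κ] [LawfulBEq κ] (key : α → κ) (c : κ)
    (ys : List α) (hs : ys.Pairwise (fun a b => key a ≤ key b))
    (hmin : ∀ y ∈ ys, key y = c ∨ c < key y) :
    ys = ys.filter (fun y => key y == c) ++ ys.filter (fun y => !(key y == c)) := by
  induction ys with
  | nil => rfl
  | cons y t ih =>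
    rcases List.pairwise_cons.mp hs with ⟨h1, h2⟩
    rcases hmin y (by simp) with hy | hy
    · rw [List.filter_cons, List.filter_cons]
      simp only [hy, BEq.rfl, if_pos, Bool.not_true, Bool.false_eq_true, if_neg,
        not_false_iff]
      rw [List.cons_append, ← ih h2 (fun z hz => hmin z (by simp [hz]))]
    · have hz : ∀ z ∈ y :: t, (key z == c) = false := by
        intro z hz
        apply beq_eq_false_iff_ne.mpr
        rcases List.mem_cons.mp hz with h | h
        · subst h; exact (ne_of_gt hy)
        · exact ne_of_gt (lt_of_lt_of_le hy (h1 z h))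
      rw [List.filter_eq_nil_iff.mpr (by intro a ha; simp [hz a ha]), List.nil_append]
      rw [List.filter_eq_self.mpr (by intro a ha; simp [hz a ha])]

-- a key-sorted list is the concatenation, over any strictly increasing key list covering it,
-- of its per-key buckets
theorem sorted_bucket_decomp {α κ : Type} [LinearOrder κ] [BEq κ] [LawfulBEq κ] (key : α → κ) :
    ∀ (cs : List κ) (ys : List α), ys.Pairwise (fun a b => key a ≤ key b) →
    cs.Pairwise (· < ·) → (∀ y ∈ ys, key y ∈ cs) →
    ys = cs.flatMap (fun c => ys.filter (fun y => key y == c)) := by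
  intro cs
  induction cs with
  | nil =>
    intro ys _ _ hcov
    cases ys with
    | nil => rfl
    | cons y t => exact absurd (hcov y (by simp)) (by simp)
  | cons c rest ih =>
    intro ys hys hcs hcov
    rcases List.pairwise_cons.mp hcs with ⟨h1, h2⟩
    have hmin : ∀ y ∈ ys, key y = c ∨ c < key y := by
      intro y hy
      rcases List.mem_cons.mp (hcov y hy) with h | h
      · exact Or.inl h
      · exact Or.inr (h1 _ h)
    have hsplit := sorted_split_min key c ys hys hmin
    have hg : ∀ c' ∈ rest, ys.filter (fun y => key y == c')
        = (ys.filter (fun y => !(key y == c))).filter (fun y => key y == c') := by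
      intro c' hc'
      rw [List.filter_filter]
      apply List.filter_congr
      intro y _
      by_cases h : key y = c'
      · simp [h, beq_eq_false_iff_ne.mpr (ne_of_gt (h1 c' hc'))]
      · simp [beq_eq_false_iff_ne.mpr h]
    have hih := ih (ys.filter (fun y => !(key y == c)))
      (hys.sublist List.filter_sublist)
      h2
      (by
        intro y hy
        rcases List.mem_filter.mp hy with ⟨hy1, hy2⟩
        rcases List.mem_cons.mp (hcov y hy1) with h | h
        · simp [h] at hy2
        · exact h)
    rw [List.flatMap_cons]
    conv_lhs => rw [hsplit]
    congr 1
    rw [hih]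
    apply List.flatMap_congr
    intro c' hc'
    exact (hg c' hc').symm

-- ---- B-side: the change-detection fold over one group, then over the groups ----

-- within a group (prev = this category) the fold just appends the recipe lines
theorem step_group (c : String) : ∀ (g : List (List (String × String))) (lines : List String),
    (∀ r ∈ g, pvCat r = c) →
    g.foldl pvStep (lines, some c) = (lines ++ g.map (pvLine c), some c) := by
  intro g
  induction g with
  | nil => intro lines _; simp
  | cons r t ih =>
    intro lines hall
    have hc : pvCat r = c := hall r (by simp)
    simp only [List.foldl_cons]
    rw [show pvStep (lines, some c) r = (lines ++ [pvLine c r], some c) from by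
      simp [pvStep, hc]]
    rw [ih _ (fun r hr => hall r (by simp [hr]))]
    simp

-- entering a fresh group emits (blank unless first) + heading + blank + the lines
theorem step_enter (c : String) (g : List (List (String × String))) (lines : List String)
    (p : Option String) (hne : g ≠ []) (hall : ∀ r ∈ g, pvCat r = c) (hp : p ≠ some c) :
    g.foldl pvStep (lines, p)
      = ((if p = none then lines else lines ++ [""]) ++ [pvHeading c, ""]
          ++ g.map (pvLine c), some c) := by
  cases g with
  | nil => exact absurd rfl hne
  | cons r t =>
    have hc : pvCat r = c := hall r (by simp)
    simp only [List.foldl_cons]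
    rw [show pvStep (lines, p) r
        = ((if p = none then lines else lines ++ [""]) ++ [pvHeading c, ""]
            ++ [pvLine c r], some c) from by
      simp [pvStep, hc, hp]]
    rw [step_group c t _ (fun r hr => hall r (by simp [hr]))]
    simp

-- the whole pass over the remaining groups, previous category already set
theorem step_outer (G : String → List (List (String × String))) :
    ∀ (cs : List String) (lines : List String) (d : String),
    cs.Pairwise (· < ·) →
    (∀ c ∈ cs, G c ≠ [] ∧ ∀ r ∈ G c, pvCat r = c) →
    (∀ c ∈ cs, d ≠ c) →
    (cs.flatMap G).foldl pvStep (lines, some d)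
      = (lines ++ cs.flatMap (fun c => [""] ++ [pvHeading c, ""] ++ (G c).map (pvLine c)),
         some (cs.getLastD d)) := by
  intro cs
  induction cs with
  | nil => intro lines d _ _ _; simp
  | cons c rest ih =>
    intro lines d hpw hG hp
    rcases List.pairwise_cons.mp hpw with ⟨h1, h2⟩
    obtain ⟨hne, hall⟩ := hG c (by simp)
    simp only [List.flatMap_cons, List.foldl_append]
    rw [step_enter c (G c) lines (some d) hne hall
      (by simpa using (hp c (by simp)))]
    rw [if_neg (by simp)]
    rw [ih _ c h2 (fun c' hc' => hG c' (by simp [hc']))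
      (fun c' hc' => ne_of_lt (h1 c' hc'))]
    cases rest with
    | nil => simp
    | cons c' rest' => simp [List.getLastD]

-- moving each group's trailing blank line to the front of the next group
theorem rotate_blank {κ : Type} (f : κ → List String) :
    ∀ (l : List κ), [""] ++ l.flatMap (fun c => f c ++ [""])
      = l.flatMap (fun c => [""] ++ f c) ++ [""] := by
  intro l
  induction l with
  | nil => rfl
  | cons c t ih =>
    simp only [List.flatMap_cons, List.append_assoc]
    rw [ih]

-- A's output lines, in flatMap form over the sorted distinct categories
theorem a_lines (recipes : List (List (String × String))) :
    update_readme recipes = PySem.Str.join "\n" (["# Kochbuch", ""]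
      ++ (PySem.List.sorted (PySem.Set.ofList ((recipes.filter (fun r => !pvSkip r)).map pvCat)) (fun c => c)).flatMap
        (fun c => [pvHeading c, ""]
          ++ (PySem.List.sorted ((recipes.filter (fun r => !pvSkip r)).filter (fun r => pvCat r == c)) pvName).map (pvLine c)
          ++ [""])) := by
  unfold update_readme
  dsimp only
  rw [foldl_skip_filter]
  rw [group_fold_keys]
  have hkeys : (PySem.Dict.empty : PySem.Dict String (List (List (String × String)))).keys = [] := rfl
  rw [hkeys, PySem.Set.update_nil_left]
  congr 1
  rw [← PySem.List.foldl_append_eq_flatMap]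
  apply PySem.List.foldl_congr_mem
  intro acc cat _
  have hgetD : ((recipes.filter (fun r => !pvSkip r)).foldl
      (fun d r => d.insert (pvCat r) (d.getD (pvCat r) [] ++ [r])) PySem.Dict.empty).getD cat []
        = (recipes.filter (fun r => !pvSkip r)).filter (fun r => pvCat r == cat) := by
    rw [group_fold_getD]; rfl
  rw [hgetD, PySem.List.foldl_append_singleton_eq_map]
  simp

-- ===== VERDICT (by name: the statement is the Claim_ definition above) =====
theorem update_readme_spec : Claim_equal_update_readme := by
  intro recipes _ _
  unfold Spec_update_readme
  rw [a_lines]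
  unfold update_readme_alt
  dsimp only
  set kept := recipes.filter (fun r => !pvSkip r) with hkept
  set scats := PySem.List.sorted (PySem.Set.ofList (kept.map pvCat)) (fun c => c) with hscats
  set G : String → List (List (String × String)) :=
    fun c => PySem.List.sorted (kept.filter (fun r => pvCat r == c)) pvName with hG
  have hmemcat : ∀ c, ∀ r ∈ G c, pvCat r = c := by
    intro c r hr
    rw [hG] at hr
    have := (PySem.List.mem_sorted _ _ _ _).mp hr
    exact eq_of_beq (List.mem_filter.mp this).2
  have hGne : ∀ c ∈ scats, G c ≠ [] := by
    intro c hc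
    rw [hscats] at hc
    have hc2 : c ∈ PySem.Set.ofList (kept.map pvCat) := (PySem.List.mem_sorted _ _ _ _).mp hc
    have hc3 : c ∈ kept.map pvCat := (PySem.Set.mem_ofList _ _).mp hc2
    obtain ⟨r, hr, hrc⟩ := List.mem_map.mp hc3
    rw [hG]
    rw [Ne, PySem.List.sorted_eq_nil_iff]
    exact List.ne_nil_of_mem (List.mem_filter.mpr ⟨hr, beq_iff_eq.mpr hrc⟩)
  have hpwlt : scats.Pairwise (· < ·) := by
    rw [hscats]; exact PySem.List.sorted_ofList_pairwise_lt _
  have hitems : PySem.List.sorted (PySem.List.sorted kept pvName) pvCat = scats.flatMap G := by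
    have hcov : ∀ y ∈ PySem.List.sorted (PySem.List.sorted kept pvName) pvCat,
        pvCat y ∈ scats := by
      intro y hy
      have hy2 : y ∈ kept := (PySem.List.mem_sorted _ _ _ _).mp ((PySem.List.mem_sorted _ _ _ _).mp hy)
      rw [hscats]
      exact (PySem.List.mem_sorted _ _ _ _).mpr
        ((PySem.Set.mem_ofList _ _).mpr (List.mem_map.mpr ⟨y, hy2, rfl⟩))
    have hdecomp := sorted_bucket_decomp pvCat scats
      (PySem.List.sorted (PySem.List.sorted kept pvName) pvCat)
      (PySem.List.sorted_pairwise _ _) hpwlt hcov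
    rw [hdecomp]
    apply List.flatMap_congr
    intro c _
    rw [filter_sorted pvCat, filter_sorted pvName]
    rw [hG]
    apply PySem.List.sorted_eq_self_of_pairwise
    apply List.pairwise_of_forall_mem_list
    intro a ha b hb
    have ha2 : pvCat a = c := eq_of_beq (List.mem_filter.mp ((PySem.List.mem_sorted _ _ _ _).mp ha)).2
    have hb2 : pvCat b = c := eq_of_beq (List.mem_filter.mp ((PySem.List.mem_sorted _ _ _ _).mp hb)).2
    rw [ha2, hb2]
  rw [hitems]
  cases hsc : scats with
  | nil =>
    simp
  | cons c rest =>
    rw [hsc] at hpwlt hGne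
    rcases List.pairwise_cons.mp hpwlt with ⟨h1, h2⟩
    simp only [List.flatMap_cons, List.foldl_append]
    rw [step_enter c (G c) _ none (hGne c (by simp)) (hmemcat c) (by simp)]
    rw [if_pos rfl]
    rw [step_outer G rest _ c h2
      (fun c' hc' => ⟨hGne c' (by simp [hc']), hmemcat c'⟩)
      (fun c' hc' => ne_of_lt (h1 c' hc'))]
    rw [if_neg (by simp)]
    congr 1
    have hrot := rotate_blank (fun c' => [pvHeading c', ""] ++ (G c').map (pvLine c')) rest
    simp only [List.append_assoc] at hrot ⊢
    rw [← hrot]
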